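-- pv_equiv track=rewrite | github.com/dustndus8/programmers-algorithm | 스택큐_프린터.py | solution
-- ===== SOURCE A (Python) =====
-- def solution(priorities, location):
--     answer = 0
--     idx = []
--     for i in range(len(priorities)):
--         idx.append(i)
--     printer = []
--     while priorities:
--         check = False
--         for i in range(1, len(priorities)):
--             if priorities[0] < priorities[i]:
--                 priorities.append(priorities.pop(0))
--                 idx.append(idx.pop(0))
--                 check = True
--                 break
--         if check == False:
--             priorities.pop(0)
--             printer.append(idx.pop(0))
--     for i in range(len(printer)):
--         if printer[i] == location:
--             return i+1
--
--     return answer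
-- ===== SOURCE B (Python) =====
-- def solution(priorities, location):
--     q = list(enumerate(priorities))
--     rank = 0
--     while q:
--         vals = [p for _, p in q]
--         k = vals.index(max(vals))
--         rank += 1
--         if q[k][0] == location:
--             return rank
--         q = q[k + 1:] + q[:k]
--     return 0
-- ===== Notes on version B (the rewrite author's own statement) =====
-- stated objective: faster
-- what changed: A rotates the queue one element at a time (pop(0)/append, with an inner scan per rotation) until the front is maximal and keeps a parallel index list plus a printer list that it scans afterwards; B jumps straight to the first maximal job with max()/list.index(), slices the queue to rotate it in one step, carries (original index, priority) pairs from enumerate, and returns the rank as soon as the target job prints.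
import Mathlib
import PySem

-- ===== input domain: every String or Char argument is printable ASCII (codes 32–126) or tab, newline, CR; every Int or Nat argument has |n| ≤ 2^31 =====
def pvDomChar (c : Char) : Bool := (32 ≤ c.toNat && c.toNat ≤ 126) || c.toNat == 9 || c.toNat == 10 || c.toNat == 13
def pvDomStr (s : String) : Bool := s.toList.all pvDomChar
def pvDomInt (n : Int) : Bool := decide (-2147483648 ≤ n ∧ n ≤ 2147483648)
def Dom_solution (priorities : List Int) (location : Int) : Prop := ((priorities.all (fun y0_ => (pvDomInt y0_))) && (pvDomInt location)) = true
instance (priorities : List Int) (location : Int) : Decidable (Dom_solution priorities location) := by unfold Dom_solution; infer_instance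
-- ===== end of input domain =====

-- B replaces A's one-step-rotation simulation by jumping directly to the first maximum with
-- max/index and list slicing (objective: faster by a constant/asymptotic mechanism in Python).
-- Note: Python A empties the caller's `priorities` list in place; B does not mutate it.
-- The equivalence proved here is about the RETURN value only.

-- ===== PORT A =====
-- shared small helpers (Python max over a nonempty list, first index of the maximum);
-- the lemmas right below are cited by the ports' `decreasing_by` termination proofs.
def pvMax : List Int → Int
  | [] => 0            -- unreachable: only applied to nonempty lists
  | x :: xs => xs.foldl max x

lemma foldl_max_init (l : List Int) : ∀ (a b : Int), l.foldl max (max a b) = max a (l.foldl max b) := by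
  induction l with
  | nil => intro a b; rfl
  | cons c l ih =>
    intro a b
    simp only [List.foldl_cons, max_assoc]
    exact ih a (max b c)

lemma pvMax_cons (a b : Int) (l : List Int) : pvMax (a :: b :: l) = max a (pvMax (b :: l)) := by
  show (b :: l).foldl max a = max a (l.foldl max b)
  simp only [List.foldl_cons]
  have := foldl_max_init l a b
  simpa using this

lemma pvMax_mem : ∀ (l : List Int), l ≠ [] → pvMax l ∈ l := by
  intro l
  induction l with
  | nil => intro h; exact absurd rfl h
  | cons x xs ih =>
    intro _
    cases xs with
    | nil => simp [pvMax]
    | cons y ys =>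
      rw [pvMax_cons]
      rcases le_total x (pvMax (y :: ys)) with h | h
      · rw [max_eq_right h]
        exact List.mem_cons_of_mem _ (ih (by simp))
      · rw [max_eq_left h]; exact List.mem_cons_self
lemma le_pvMax : ∀ (l : List Int) (x : Int), x ∈ l → x ≤ pvMax l := by
  intro l
  induction l with
  | nil => intro x hx; simp at hx
  | cons a xs ih =>
    intro x hx
    cases xs with
    | nil => simp at hx; simp [pvMax, hx]
    | cons y ys =>
      rw [pvMax_cons]
      rcases List.mem_cons.mp hx with h | h
      · subst h; exact le_max_left _ _
      · exact le_trans (ih x h) (le_max_right _ _)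

lemma pvMax_append_singleton : ∀ (l : List Int) (a : Int), pvMax (l ++ [a]) = pvMax (a :: l) := by
  intro l
  induction l with
  | nil => intro a; rfl
  | cons x xs ih =>
    intro a
    cases xs with
    | nil => simp [pvMax]; exact max_comm x a
    | cons y ys =>
      have h1 : pvMax ((x :: y :: ys) ++ [a]) = max x (pvMax ((y :: ys) ++ [a])) := by
        simpa using pvMax_cons x y (ys ++ [a])
      rw [h1, ih a, pvMax_cons a y ys, pvMax_cons a x (y :: ys), pvMax_cons x y ys, max_left_comm]

-- first index of the maximum element (list nonempty)
def pvFm (ps : List Int) : Nat := ps.findIdx (fun x => decide (x = pvMax ps))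

-- the inner `for` loop of A: scan the tail, break at the first strictly greater element
def pvChk (h : Int) : List Int → Bool
  | [] => false
  | x :: xs => if h < x then true else pvChk h xs

lemma pvChk_exists : ∀ (h : Int) (l : List Int), pvChk h l = true ↔ ∃ x ∈ l, h < x := by
  intro h l
  induction l with
  | nil => simp [pvChk]
  | cons x xs ih =>
    by_cases hx : h < x
    · simp only [pvChk, if_pos hx]
      constructor
      · intro _; exact ⟨x, List.mem_cons_self, hx⟩
      · intro _; trivial
    · simp only [pvChk, if_neg hx, ih]
      constructor
      · rintro ⟨z, hz, hlt⟩; exact ⟨z, List.mem_cons_of_mem _ hz, hlt⟩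
      · rintro ⟨z, hz, hlt⟩
        rcases List.mem_cons.mp hz with rfl | hz'
        · exact absurd hlt hx
        · exact ⟨z, hz', hlt⟩

lemma pvChk_lt_max (p : Int) (l : List Int) (h : pvChk p l = true) : p < pvMax l := by
  rcases (pvChk_exists p l).mp h with ⟨x, hx, hlt⟩
  exact lt_of_lt_of_le hlt (le_pvMax l x hx)

lemma pvFm_rotate_lt (p : Int) (ps : List Int) (h : pvChk p ps = true) :
    pvFm (ps ++ [p]) < pvFm (p :: ps) := by
  have hlt : p < pvMax ps := pvChk_lt_max p ps h
  have hne : ps ≠ [] := by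
    rcases (pvChk_exists p ps).mp h with ⟨x, hx, _⟩
    exact List.ne_nil_of_mem hx
  have hM1 : pvMax (p :: ps) = pvMax ps := by
    cases ps with
    | nil => exact absurd rfl hne
    | cons y ys => rw [pvMax_cons]; exact max_eq_right (le_of_lt hlt)
  have hM2 : pvMax (ps ++ [p]) = pvMax ps := by
    rw [pvMax_append_singleton]; exact hM1
  have hmem : pvMax ps ∈ ps := pvMax_mem ps hne
  have hk0 : ps.findIdx (fun x => decide (x = pvMax ps)) < ps.length :=
    List.findIdx_lt_length_of_exists ⟨pvMax ps, hmem, by simp⟩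
  have e1 : pvFm (p :: ps) = ps.findIdx (fun x => decide (x = pvMax ps)) + 1 := by
    unfold pvFm
    rw [hM1, List.findIdx_cons]
    have : (decide (p = pvMax ps)) = false := by simp [ne_of_lt hlt]
    rw [this]; rfl
  have e2 : pvFm (ps ++ [p]) = ps.findIdx (fun x => decide (x = pvMax ps)) := by
    unfold pvFm
    rw [hM2, List.findIdx_append, if_pos hk0]
  omega

-- A's while loop: rotate while some later job outranks the head, otherwise print the head.
def pvALoop : List Int → List Int → List Int → List Int
  | [], _, printer => printer
  | p :: ps, idx, printer =>
    if pvChk p ps then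
      pvALoop (ps ++ [p]) (idx.drop 1 ++ idx.take 1) printer
    else
      pvALoop ps (idx.drop 1) (printer ++ idx.take 1)
termination_by ps _ _ => ps.length * ps.length + pvFm ps
decreasing_by
  · have := pvFm_rotate_lt p ps (by assumption)
    simp only [List.length_append, List.length_cons, List.length_nil, Nat.zero_add]
    omega
  · have hle : pvFm ps ≤ ps.length := List.findIdx_le_length
    have hsq : (ps.length + 1) * (ps.length + 1) = ps.length * ps.length + 2 * ps.length + 1 := by ring
    simp only [List.length_cons]
    omega

-- A's final for loop: first index of `location` in the print order, 1-based; else answer = 0.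
def pvScan : List Int → Int → Int → Int
  | [], _, _ => 0
  | x :: xs, loc, i => if x = loc then i + 1 else pvScan xs loc (i + 1)

def solution (priorities : List Int) (location : Int) : Int :=
  pvScan (pvALoop priorities ((List.range priorities.length).foldl (fun a i => a ++ [Int.ofNat i]) []) []) location 0

-- ===== PORT B =====
-- `vals.index(max(vals))` of Source B: first index of the maximal priority
def pvKOf (q : List (Int × Int)) : Nat :=
  (q.map Prod.snd).findIdx (fun v => decide (v = pvMax (q.map Prod.snd)))

lemma pvKOf_lt (q : List (Int × Int)) (h : q ≠ []) : pvKOf q < q.length := by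
  have hne : q.map Prod.snd ≠ [] := by simpa using h
  have := List.findIdx_lt_length_of_exists
    (p := fun v => decide (v = pvMax (q.map Prod.snd))) (xs := q.map Prod.snd)
    ⟨pvMax (q.map Prod.snd), pvMax_mem _ hne, by simp⟩
  simpa [pvKOf] using this

-- Source B's while loop: q[k] is the job printed next (getD's default is unreachable: pvKOf_lt),
-- the new queue is q[k+1:] + q[:k]
def pvBLoop : List (Int × Int) → Int → Int → Int
  | [], _, _ => 0
  | x :: qs, loc, rank =>
    if ((x :: qs).getD (pvKOf (x :: qs)) (0, 0)).1 = loc then rank + 1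
    else pvBLoop ((x :: qs).drop (pvKOf (x :: qs) + 1) ++ (x :: qs).take (pvKOf (x :: qs))) loc (rank + 1)
termination_by q _ _ => q.length
decreasing_by
  have hk := pvKOf_lt (x :: qs) (by simp)
  rw [List.length_append, List.length_drop, List.length_take]
  omega

def solution_alt (priorities : List Int) (location : Int) : Int :=
  pvBLoop (PySem.List.enumerate priorities) location 0

-- ===== PRECONDITION & SPEC =====
def Spec_solution (priorities : List Int) (location : Int) (out : Int) : Prop := out = solution_alt priorities location
instance (priorities : List Int) (location : Int) (out : Int) : Decidable (Spec_solution priorities location out) := by unfold Spec_solution; infer_instance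

-- ===== CLAIM (what is proved, stated in full; the proofs are below) =====
def Claim_equal_solution : Prop := ∀ (priorities : List Int) (location : Int), Dom_solution priorities location → Spec_solution priorities location (solution priorities location)

-- ===== LEMMAS AND PROOFS =====

-- the print order (original indices), defined by B's recursion shape
def pOrder : List (Int × Int) → List Int
  | [] => []
  | x :: qs =>
    ((x :: qs).getD (pvKOf (x :: qs)) (0, 0)).1 ::
      pOrder ((x :: qs).drop (pvKOf (x :: qs) + 1) ++ (x :: qs).take (pvKOf (x :: qs)))
termination_by q => q.length
decreasing_by
  have hk := pvKOf_lt (x :: qs) (by simp)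
  rw [List.length_append, List.length_drop, List.length_take]
  omega

lemma pvBLoop_eq_scan : ∀ (q : List (Int × Int)) (loc rank : Int),
    pvBLoop q loc rank = pvScan (pOrder q) loc rank := by
  intro q loc rank
  induction q, loc, rank using pvBLoop.induct with
  | case1 loc rank => rw [pvBLoop, pOrder, pvScan]
  | case2 x qs rank =>
    rw [pvBLoop, pOrder, pvScan, if_pos rfl, if_pos rfl]
  | case3 x qs loc rank hif ih =>
    rw [pvBLoop, pOrder, pvScan, if_neg hif, if_neg hif, ih]

-- rotating a non-maximal head to the back does not change the print order
lemma pOrder_rotate (y : Int × Int) (qs : List (Int × Int))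
    (hqs : qs ≠ []) (hy : y.2 < pvMax (qs.map Prod.snd)) :
    pOrder (qs ++ [y]) = pOrder (y :: qs) := by
  obtain ⟨z, qs', rfl⟩ : ∃ z qs', qs = z :: qs' := by
    cases qs with
    | nil => exact absurd rfl hqs
    | cons a l => exact ⟨a, l, rfl⟩
  have hM1 : pvMax ((y :: z :: qs').map Prod.snd) = pvMax ((z :: qs').map Prod.snd) := by
    simp only [List.map_cons]
    rw [pvMax_cons]
    exact max_eq_right (le_of_lt (by simpa using hy))
  have hM2 : pvMax (((z :: qs') ++ [y]).map Prod.snd) = pvMax ((z :: qs').map Prod.snd) := by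
    rw [List.map_append, show List.map Prod.snd [y] = [y.2] from rfl, pvMax_append_singleton]
    exact hM1
  have hMmem : pvMax ((z :: qs').map Prod.snd) ∈ (z :: qs').map Prod.snd :=
    pvMax_mem _ (by simp)
  have hk0lt : ((z :: qs').map Prod.snd).findIdx
      (fun v => decide (v = pvMax ((z :: qs').map Prod.snd))) < ((z :: qs').map Prod.snd).length :=
    List.findIdx_lt_length_of_exists ⟨_, hMmem, by simp⟩
  set k0 := ((z :: qs').map Prod.snd).findIdx
      (fun v => decide (v = pvMax ((z :: qs').map Prod.snd))) with hk0def
  have hk0len : k0 < (z :: qs').length := by simpa using hk0lt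
  have hky : pvKOf (y :: z :: qs') = k0 + 1 := by
    unfold pvKOf
    simp only [hM1]
    rw [show ((y :: z :: qs').map Prod.snd) = y.2 :: (z :: qs').map Prod.snd from rfl,
        List.findIdx_cons]
    have hne : (decide (y.2 = pvMax ((z :: qs').map Prod.snd))) = false := by
      simp only [decide_eq_false_iff_not]
      exact ne_of_lt hy
    rw [hne]
    rfl
  have hkr : pvKOf ((z :: qs') ++ [y]) = k0 := by
    unfold pvKOf
    simp only [hM2]
    rw [List.map_append, List.findIdx_append, if_pos (by simpa using hk0lt)]
  have hhead : (((z :: qs') ++ [y]).getD k0 (0, 0)) = ((y :: z :: qs').getD (k0 + 1) (0, 0)) := by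
    rw [List.getD_cons_succ, List.getD_append _ _ _ _ hk0len]
  have htail : ((z :: qs') ++ [y]).drop (k0 + 1) ++ ((z :: qs') ++ [y]).take k0
      = (y :: z :: qs').drop (k0 + 1 + 1) ++ (y :: z :: qs').take (k0 + 1) := by
    rw [List.drop_append_of_le_length (by omega),
        List.take_append_of_le_length (by omega)]
    rw [show (y :: z :: qs').drop (k0 + 1 + 1) = (z :: qs').drop (k0 + 1) from rfl,
        show (y :: z :: qs').take (k0 + 1) = y :: (z :: qs').take k0 from rfl]
    simp [List.append_assoc]
  have e1 : pOrder ((z :: qs') ++ [y])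
      = (((z :: qs') ++ [y]).getD (pvKOf ((z :: qs') ++ [y])) (0, 0)).1 ::
        pOrder (((z :: qs') ++ [y]).drop (pvKOf ((z :: qs') ++ [y]) + 1) ++
          ((z :: qs') ++ [y]).take (pvKOf ((z :: qs') ++ [y]))) := by
    rw [show (z :: qs') ++ [y] = z :: (qs' ++ [y]) from rfl]
    rw [pOrder]
  have e2 : pOrder (y :: z :: qs')
      = ((y :: z :: qs').getD (pvKOf (y :: z :: qs')) (0, 0)).1 ::
        pOrder ((y :: z :: qs').drop (pvKOf (y :: z :: qs') + 1) ++
          (y :: z :: qs').take (pvKOf (y :: z :: qs'))) := by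
    rw [pOrder]
  rw [e1, e2, hky, hkr, hhead, htail]

lemma pvALoop_eq_pOrder : ∀ (ps idx acc : List Int), idx.length = ps.length →
    pvALoop ps idx acc = acc ++ pOrder (idx.zip ps) := by
  intro ps idx acc
  induction ps, idx, acc using pvALoop.induct with
  | case1 idx printer =>
    intro _
    rw [pvALoop, List.zip_nil_right, pOrder, List.append_nil]
  | case2 p ps idx printer hchk ih =>
    intro h
    obtain ⟨i, idx', rfl⟩ : ∃ i idx', idx = i :: idx' := by
      cases idx with
      | nil => simp at h
      | cons a l => exact ⟨a, l, rfl⟩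
    have hlen : idx'.length = ps.length := by simpa using h
    have hne : ps ≠ [] := by
      rcases (pvChk_exists p ps).mp hchk with ⟨x, hx, _⟩
      exact List.ne_nil_of_mem hx
    have hsnd : (idx'.zip ps).map Prod.snd = ps :=
      List.map_snd_zip (le_of_eq hlen.symm)
    have hzlen : (idx'.zip ps).length = ps.length := by
      rw [List.length_zip, hlen, Nat.min_self]
    have hzne : idx'.zip ps ≠ [] := by
      intro hz
      rw [hz] at hzlen
      exact hne (List.length_eq_zero_iff.mp (by simpa using hzlen.symm))
    have hrot : pOrder (idx'.zip ps ++ [(i, p)]) = pOrder ((i, p) :: idx'.zip ps) := by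
      apply pOrder_rotate
      · exact hzne
      · rw [hsnd]
        exact pvChk_lt_max p ps hchk
    have hlen2 : (List.drop 1 (i :: idx') ++ List.take 1 (i :: idx')).length = (ps ++ [p]).length := by
      simp only [List.length_append, List.length_drop, List.length_take, List.length_cons,
        List.length_nil]
      omega
    have ih' := ih hlen2
    have hdt : List.drop 1 (i :: idx') ++ List.take 1 (i :: idx') = idx' ++ [i] := by simp
    rw [hdt] at ih'
    rw [pvALoop, if_pos hchk, hdt, ih']
    rw [List.zip_append hlen]
    rw [show [i].zip [p] = [(i, p)] from rfl, hrot]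
    rw [show (i :: idx').zip (p :: ps) = (i, p) :: idx'.zip ps from rfl]
  | case3 p ps idx printer hchk ih =>
    intro h
    obtain ⟨i, idx', rfl⟩ : ∃ i idx', idx = i :: idx' := by
      cases idx with
      | nil => simp at h
      | cons a l => exact ⟨a, l, rfl⟩
    have hlen : idx'.length = ps.length := by simpa using h
    have hsnd : (idx'.zip ps).map Prod.snd = ps :=
      List.map_snd_zip (le_of_eq hlen.symm)
    have hnotlt : ∀ x ∈ ps, ¬ p < x := by
      intro x hx hlt
      have hc : pvChk p ps = true := (pvChk_exists p ps).mpr ⟨x, hx, hlt⟩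
      exact hchk hc
    have hmax : pvMax (p :: ps) = p := by
      cases ps with
      | nil => rfl
      | cons y ys =>
        rw [pvMax_cons]
        have : pvMax (y :: ys) ≤ p :=
          not_lt.mp (hnotlt _ (pvMax_mem (y :: ys) (by simp)))
        exact max_eq_left this
    have hk : pvKOf ((i, p) :: idx'.zip ps) = 0 := by
      unfold pvKOf
      rw [show ((i, p) :: idx'.zip ps).map Prod.snd = p :: (idx'.zip ps).map Prod.snd from rfl,
          hsnd, hmax, List.findIdx_cons]
      simp
    have hord : pOrder ((i, p) :: idx'.zip ps) = i :: pOrder (idx'.zip ps) := by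
      rw [pOrder, hk]
      simp
    have hlen3 : (List.drop 1 (i :: idx')).length = ps.length := by
      simpa using hlen
    have ih' := ih hlen3
    rw [show List.drop 1 (i :: idx') = idx' from rfl,
        show List.take 1 (i :: idx') = [i] from rfl] at ih'
    rw [pvALoop, if_neg hchk]
    rw [show List.drop 1 (i :: idx') = idx' from rfl,
        show List.take 1 (i :: idx') = [i] from rfl]
    rw [ih']
    rw [show (i :: idx').zip (p :: ps) = (i, p) :: idx'.zip ps from rfl, hord]
    simp

lemma foldl_append_range : ∀ (l : List Nat) (acc : List Int),
    l.foldl (fun a i => a ++ [Int.ofNat i]) acc = acc ++ l.map (fun i => Int.ofNat i) := by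
  intro l
  induction l with
  | nil => intro acc; simp
  | cons x xs ih =>
    intro acc
    rw [List.foldl_cons, ih (acc ++ [Int.ofNat x])]
    simp

lemma zip_range_enum : ∀ (ps : List Int) (s : Int),
    ((List.range ps.length).map (fun i => s + Int.ofNat i)).zip ps = PySem.List.enumerate ps s := by
  intro ps
  induction ps with
  | nil => intro s; rfl
  | cons p ps ih =>
    intro s
    rw [List.length_cons, List.range_succ_eq_map, List.map_cons, List.map_map,
        PySem.List.enumerate_cons]
    rw [show ((fun i => s + Int.ofNat i) ∘ Nat.succ) = fun i => (s + 1) + Int.ofNat i from by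
      funext i
      show s + Int.ofNat (i + 1) = (s + 1) + Int.ofNat i
      simp only [Int.ofNat_eq_natCast]
      push_cast
      ring]
    rw [show (s + Int.ofNat 0) = s from by simp]
    rw [List.zip_cons_cons, ih (s + 1)]

-- ===== VERDICT (by name: the statement is the Claim_ definition above) =====
theorem solution_spec : Claim_equal_solution := by
  intro priorities location _
  unfold Spec_solution solution solution_alt
  rw [foldl_append_range]
  have hzip : ((List.range priorities.length).map (fun i => Int.ofNat i)).zip priorities
      = PySem.List.enumerate priorities 0 := by
    rw [← zip_range_enum priorities 0]
    congr 1
    exact List.map_congr_left (fun x _ => by simp)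
  rw [pvALoop_eq_pOrder _ _ _ (by simp)]
  simp only [List.nil_append]
  rw [hzip, ← pvBLoop_eq_scan]
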